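-- pv_equiv track=rewrite | github.com/jgheithcock/leetcode | 2140-solving-questions-with-brainpower.py | mostPointsBest
-- ===== SOURCE A (Python) =====
-- from typing import List
--
-- def mostPointsBest(questions: List[List[int]]) -> int:
--     n = len(questions)
--     dp = [0] * n
--     dp[n-1] = questions[n-1][0]
--
--     for i in range(n-2, -1 , -1):
--         p, s = questions[i][0], questions[i][1] + i + 1
--         if s >= n:
--             dp[i] = max(p, dp[i+1])
--         else:
--             dp[i] = max(p+dp[s], dp[i+1])
--     return dp[0]
-- ===== SOURCE B (Python) =====
-- from typing import List
--
-- def mostPointsBest(questions: List[List[int]]) -> int: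
--     n = len(questions)
--     dp = [0] * (n + 1)
--     # forward push DP over the first n-1 questions:
--     # dp[j] = best score over already-seen questions with the next solvable question at index j;
--     # a solve whose cooldown runs past the end goes into the running 'best' instead of a cell
--     best = None
--     for i in range(n - 1):
--         q = questions[i]
--         if dp[i] > dp[i + 1]:
--             dp[i + 1] = dp[i]
--         j = i + q[1] + 1
--         v = dp[i] + q[0]
--         if j >= n:
--             if best is None or v > best:
--                 best = v
--         else:
--             if v > dp[j]:
--                 dp[j] = v
--     # solving the last question always ends the game, so its brainpower is irrelevant
--     last = dp[n - 1] + questions[n - 1][0]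
--     return last if best is None else max(best, last)
-- ===== Notes on version B (the rewrite author's own statement) =====
-- stated objective: alternative
-- what changed: Replaces A's backward suffix-optimum DP (dp[i] = best from question i on, filled right-to-left) by a forward push-style DP over dp[0..n-1] with a running best for solves whose cooldown passes the end, plus a closing formula for the last question, whose brainpower is irrelevant.
-- outside the precondition, e.g. on mostPointsBest([[3, -2], [1, 0]]): A returns 4, B returns 1; on mostPointsBest([[7, -3], [2, 0], [1, 0]]): A returns 10, B returns 8
import Mathlib
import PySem

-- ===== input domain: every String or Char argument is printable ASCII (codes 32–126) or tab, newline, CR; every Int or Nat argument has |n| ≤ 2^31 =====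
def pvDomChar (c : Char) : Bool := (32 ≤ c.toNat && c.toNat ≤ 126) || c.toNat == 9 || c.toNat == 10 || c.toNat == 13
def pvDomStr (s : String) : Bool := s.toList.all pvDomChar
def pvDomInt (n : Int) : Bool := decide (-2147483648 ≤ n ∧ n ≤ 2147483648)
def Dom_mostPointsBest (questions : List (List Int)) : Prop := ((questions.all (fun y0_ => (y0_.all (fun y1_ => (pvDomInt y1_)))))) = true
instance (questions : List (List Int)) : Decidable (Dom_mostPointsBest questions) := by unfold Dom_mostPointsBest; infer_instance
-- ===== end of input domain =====

-- B replaces A's backward suffix-optimum DP with a forward push-style DP plus a running best for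
-- past-the-end solves (alternative decomposition, same O(n) cost); equivalence on Pre_.


-- ===== PORT A =====
-- one loop iteration of A: dp[i] = max(p + dp[s], dp[i+1]) (or max(p, dp[i+1]) when s >= n)
def stepA (questions : List (List Int)) (n : Nat) (dp : List Int) (i : Nat) : List Int :=
  let p := PySem.List.pyGetD (PySem.List.pyGetD questions (i : Int) []) 0 0
  let s := PySem.List.pyGetD (PySem.List.pyGetD questions (i : Int) []) 1 0 + (i : Int) + 1
  if (n : Int) ≤ s then dp.set i (max p (PySem.List.pyGetD dp ((i : Int) + 1) 0))
  else dp.set i (max (p + PySem.List.pyGetD dp s 0) (PySem.List.pyGetD dp ((i : Int) + 1) 0))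

-- 'for i in range(n-2, -1, -1)': counter k+1 runs the body at index i = k, then counts down
def loopA (questions : List (List Int)) (n : Nat) : Nat → List Int → List Int
  | 0, dp => dp
  | k + 1, dp => loopA questions n k (stepA questions n dp k)

def mostPointsBest (questions : List (List Int)) : Int :=
  let n := questions.length
  let dp := List.replicate n (0 : Int)
  let dp := dp.set (n - 1) (PySem.List.pyGetD (PySem.List.pyGetD questions ((n : Int) - 1) []) 0 0)
  let dp := loopA questions n (n - 1) dp
  PySem.List.pyGetD dp 0 0

-- ===== PORT B =====
-- one iteration of B's forward loop: propagate skip to dp[i+1]; a solve that jumps past the end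
-- goes into the running best, otherwise it is pushed to dp[i+b+1]
def stepB (questions : List (List Int)) (n : Nat) (st : List Int × Option Int) (i : Nat) :
    List Int × Option Int :=
  let dp := st.1
  let best := st.2
  let q := PySem.List.pyGetD questions (i : Int) []
  let dp := if dp.getD (i + 1) 0 < dp.getD i 0 then dp.set (i + 1) (dp.getD i 0) else dp
  let j : Int := (i : Int) + PySem.List.pyGetD q 1 0 + 1
  let v := dp.getD i 0 + PySem.List.pyGetD q 0 0
  if (n : Int) ≤ j then
    (dp, match best with
         | none => some v
         | some b => if b < v then some v else some b)
  else
    if PySem.List.pyGetD dp j 0 < v then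
      -- Python's 'dp[j] = v': a negative in-range j indexes from the end, hence the length branch
      (dp.set (if j < 0 then ((dp.length : Int) + j).toNat else j.toNat) v, best)
    else (dp, best)

-- 'for i in range(n - 1)': fuel counts the remaining iterations, i is the loop index
def loopB (questions : List (List Int)) (n : Nat) :
    Nat → Nat → List Int × Option Int → List Int × Option Int
  | 0, _, st => st
  | fuel + 1, i, st => loopB questions n fuel (i + 1) (stepB questions n st i)

def mostPointsBest_alt (questions : List (List Int)) : Int :=
  let n := questions.length
  let st := loopB questions n (n - 1) 0 (List.replicate (n + 1) (0 : Int), none)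
  let last := st.1.getD (n - 1) 0 + PySem.List.pyGetD (PySem.List.pyGetD questions ((n : Int) - 1) []) 0 0
  match st.2 with
  | none => last
  | some b => max b last

-- ===== PRECONDITION & SPEC =====
-- Pre_ is the problem's stated domain (LeetCode 2140: questions nonempty, questions[i] = [points_i,
-- brainpower_i]): the list is nonempty, the last question has at least its points entry, and every
-- earlier question is a pair with nonnegative brainpower. Outside it A raises (empty list, a short
-- non-final question) or, for a negative brainpower before the last question, A's value comes from
-- negative-index wraparound / stale-cell reads of its dp array — an implementation artefact that B
-- does not reproduce; see claim.json cites for excluded examples.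
def Pre_mostPointsBest (questions : List (List Int)) : Prop :=
  questions ≠ [] ∧ 1 ≤ (questions.getD (questions.length - 1) []).length ∧
    ∀ q ∈ questions.dropLast, 2 ≤ q.length ∧ 0 ≤ q.getD 1 0
instance (questions : List (List Int)) : Decidable (Pre_mostPointsBest questions) := by
  unfold Pre_mostPointsBest; infer_instance

def pvWitness_mostPointsBest : List (List Int) := [[5, 1], [3, 2], [7, 0]]

def Spec_mostPointsBest (questions : List (List Int)) (out : Int) : Prop := out = mostPointsBest_alt questions
instance (questions : List (List Int)) (out : Int) : Decidable (Spec_mostPointsBest questions out) := by unfold Spec_mostPointsBest; infer_instance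

-- ===== CLAIM (what is proved, stated in full; the proofs are below) =====
def Claim_equal_mostPointsBest : Prop := ∀ (questions : List (List Int)), Dom_mostPointsBest questions → Pre_mostPointsBest questions → Spec_mostPointsBest questions (mostPointsBest questions)

-- ===== LEMMAS AND PROOFS =====

-- points / brainpower of question i
def pvP (qs : List (List Int)) (i : Nat) : Int := (qs.getD i []).getD 0 0
def pvB (qs : List (List Int)) (i : Nat) : Int := (qs.getD i []).getD 1 0

-- the common specification: pvG qs i = A's dp[i] = best score over the chains of questions in
-- [i, n) that solve at least one question and end at a question whose cooldown passes the end
def pvG (qs : List (List Int)) (i : Nat) : Int :=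
  if _h : i + 1 < qs.length then
    max (pvG qs (i + 1))
        (pvP qs i + (if (qs.length : Int) ≤ pvB qs i + i + 1 then 0
                     else pvG qs (max (i + 1) (pvB qs i + i + 1).toNat)))
  else pvP qs (qs.length - 1)
termination_by qs.length - i
decreasing_by
  · omega
  · have := Nat.le_max_left (i + 1) ((pvB qs i + i + 1).toNat); omega

lemma pvG_base (qs : List (List Int)) (i : Nat) (h : ¬ i + 1 < qs.length) :
    pvG qs i = pvP qs (qs.length - 1) := by
  rw [pvG, dif_neg h]

lemma pvG_mono_step (qs : List (List Int)) (i : Nat) (h : i + 1 < qs.length) :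
    pvG qs (i + 1) ≤ pvG qs i := by
  conv_rhs => rw [pvG, dif_pos h]
  exact le_max_left _ _

-- the recursion of pvG in its convenient form (interior index, nonnegative brainpower)
lemma pvG_eq (qs : List (List Int)) (i : Nat) (hi : i + 1 < qs.length) (hb : 0 ≤ pvB qs i) :
    pvG qs i = max (pvG qs (i + 1))
      (pvP qs i + (if (qs.length : Int) ≤ pvB qs i + i + 1 then 0
                   else pvG qs (pvB qs i + i + 1).toNat)) := by
  rw [pvG, dif_pos hi]
  split
  · rfl
  · next hlt =>
    rw [show max (i + 1) ((pvB qs i + i + 1).toNat) = (pvB qs i + i + 1).toNat by omega]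

-- list indexing helpers
lemma getD_set_self (l : List Int) (i : Nat) (v : Int) (h : i < l.length) :
    (l.set i v).getD i 0 = v := by
  simp [List.getD_eq_getElem?_getD, h]

lemma getD_set_ne (l : List Int) (i j : Nat) (v : Int) (h : i ≠ j) :
    (l.set i v).getD j 0 = l.getD j 0 := by
  simp [List.getD_eq_getElem?_getD, h]

lemma getD_replicate_zero (m j : Nat) : (List.replicate m (0 : Int)).getD j 0 = 0 := by
  simp only [List.getD_eq_getElem?_getD, List.getElem?_replicate]
  split <;> rfl

-- ----- side A: the backward loop computes pvG -----

lemma loopA_correct (qs : List (List Int)) (hb : ∀ t, t < qs.length - 1 → 0 ≤ pvB qs t) :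
    ∀ (k : Nat) (dp : List Int), k ≤ qs.length - 1 → dp.length = qs.length →
      (∀ j, k ≤ j → j < qs.length → dp.getD j 0 = pvG qs j) →
      ∀ j, j < qs.length → (loopA qs qs.length k dp).getD j 0 = pvG qs j := by
  intro k
  induction k with
  | zero =>
    intro dp _ _ hinv j hj
    exact hinv j (Nat.zero_le j) hj
  | succ k ih =>
    intro dp hk hlen hinv j hj
    show (loopA qs qs.length k (stepA qs qs.length dp k)).getD j 0 = pvG qs j
    have hklt : k < qs.length - 1 := by omega
    have hklen : k + 1 < qs.length := by omega
    refine ih (stepA qs qs.length dp k) (by omega) ?_ ?_ j hj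
    · simp only [stepA]
      split <;> simp [List.length_set, hlen]
    · intro j hkj hjlen
      -- value facts
      have hq : PySem.List.pyGetD qs (k : Int) [] = qs.getD k [] := PySem.List.pyGetD_natCast qs k []
      have hp : PySem.List.pyGetD (PySem.List.pyGetD qs (k : Int) []) 0 0 = pvP qs k := by
        rw [hq]; exact PySem.List.pyGetD_ofNat' _ 0 0
      have hbk : PySem.List.pyGetD (PySem.List.pyGetD qs (k : Int) []) 1 0 = pvB qs k := by
        rw [hq]; exact PySem.List.pyGetD_ofNat' _ 1 0
      have hdp1 : PySem.List.pyGetD dp ((k : Int) + 1) 0 = pvG qs (k + 1) := by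
        have : ((k : Int) + 1) = ((k + 1 : Nat) : Int) := by push_cast; ring
        rw [this, PySem.List.pyGetD_natCast]
        exact hinv (k + 1) (le_refl _) hklen
      rcases Nat.lt_or_ge k j with hlt | hge
      · -- untouched cell
        simp only [stepA]
        split <;>
        · rw [hbk] at *
          rw [getD_set_ne _ _ _ _ (by omega)]
          exact hinv j (by omega) hjlen
      · -- j = k : the freshly written cell
        have hjk : j = k := by omega
        subst hjk
        have hb0 : 0 ≤ pvB qs j := hb j hklt
        simp only [stepA]
        rw [hp, hbk, hdp1]
        rw [pvG_eq qs j hklen hb0]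
        split
        · next hge2 =>
          -- s ≥ n
          rw [getD_set_self _ _ _ (by omega)]
          rw [add_zero, max_comm]
        · next hge2 =>
          -- s < n, so s is an in-range index strictly below n
          have hsnn : 0 ≤ pvB qs j + (j : Int) + 1 := by omega
          have hlt2 : (pvB qs j + j + 1).toNat < qs.length := by omega
          have hs : PySem.List.pyGetD dp (pvB qs j + (j : Int) + 1) 0
              = pvG qs (pvB qs j + j + 1).toNat := by
            have hcast : pvB qs j + (j : Int) + 1 = (((pvB qs j + j + 1).toNat : Nat) : Int) := by omega
            rw [hcast, PySem.List.pyGetD_natCast]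
            exact hinv _ (by omega) hlt2
          rw [hs, getD_set_self _ _ _ (by omega)]
          rw [max_comm]

-- A's whole computation equals pvG qs 0
lemma mostPointsBest_eq_pvG (qs : List (List Int)) (hne : qs ≠ [])
    (hb : ∀ t, t < qs.length - 1 → 0 ≤ pvB qs t) :
    mostPointsBest qs = pvG qs 0 := by
  have hn : 1 ≤ qs.length := by
    cases qs with
    | nil => exact absurd rfl hne
    | cons a l => simp
  simp only [mostPointsBest]
  set n := qs.length with hn_def
  have hvinit : PySem.List.pyGetD (PySem.List.pyGetD qs ((n : Int) - 1) []) 0 0 = pvP qs (n - 1) := by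
    have : (n : Int) - 1 = ((n - 1 : Nat) : Int) := by omega
    rw [this, PySem.List.pyGetD_natCast]
    exact PySem.List.pyGetD_ofNat' _ 0 0
  rw [hvinit]
  have hfin : ∀ j, j < n → (loopA qs n (n - 1)
      ((List.replicate n (0 : Int)).set (n - 1) (pvP qs (n - 1)))).getD j 0 = pvG qs j := by
    refine loopA_correct qs hb (n - 1) _ (by omega) (by simp [hn_def]) ?_
    intro j hj hjlen
    have hje : j = n - 1 := by omega
    subst hje
    rw [getD_set_self _ _ _ (by simp; omega)]
    rw [pvG_base qs (n - 1) (by omega)]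
  have h0 : PySem.List.pyGetD (loopA qs n (n - 1)
      ((List.replicate n (0 : Int)).set (n - 1) (pvP qs (n - 1)))) 0 0
      = pvG qs 0 := by
    have := hfin 0 (by omega)
    calc PySem.List.pyGetD (loopA qs n (n - 1)
        ((List.replicate n (0 : Int)).set (n - 1) (pvP qs (n - 1)))) ((0 : Nat) : Int) 0
        = (loopA qs n (n - 1)
        ((List.replicate n (0 : Int)).set (n - 1) (pvP qs (n - 1)))).getD 0 0 :=
          PySem.List.pyGetD_natCast _ 0 0
      _ = pvG qs 0 := this
  exact h0

-- ----- side B: the potential optMax best (maxW dp i) is a loop invariant -----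

def optMax : Option Int → Int → Int
  | none, x => x
  | some b, x => max b x

-- maxW qs dp i = max over j in [i, n-1] of dp[j] + pvG j  (the best completion of the forward state)
def maxW (qs : List (List Int)) (dp : List Int) (i : Nat) : Int :=
  if _h : i + 1 < qs.length then max (dp.getD i 0 + pvG qs i) (maxW qs dp (i + 1))
  else dp.getD (qs.length - 1) 0 + pvG qs (qs.length - 1)
termination_by qs.length - i

lemma maxW_ge (qs : List (List Int)) (dp : List Int) (i j : Nat) (hij : i ≤ j)
    (hj : j ≤ qs.length - 1) : dp.getD j 0 + pvG qs j ≤ maxW qs dp i := by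
  rw [maxW]
  split
  · rcases Nat.eq_or_lt_of_le hij with hje | hjlt
    · subst hje; exact le_max_left _ _
    · exact le_trans (maxW_ge qs dp (i + 1) j hjlt hj) (le_max_right _ _)
  · have hj2 : j = qs.length - 1 := by omega
    subst hj2
    exact le_refl _
termination_by qs.length - i

lemma maxW_le (qs : List (List Int)) (dp : List Int) (i : Nat) (c : Int) (hi : i ≤ qs.length - 1)
    (h : ∀ j, i ≤ j → j ≤ qs.length - 1 → dp.getD j 0 + pvG qs j ≤ c) : maxW qs dp i ≤ c := by
  rw [maxW]
  split
  · refine max_le (h i (le_refl _) hi) ?_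
    exact maxW_le qs dp (i + 1) c (by omega) (fun j h1 h2 => h j (by omega) h2)
  · exact h (qs.length - 1) hi (le_refl _)
termination_by qs.length - i

lemma maxW_last (qs : List (List Int)) (dp : List Int) (h : ¬ qs.length - 1 + 1 < qs.length) :
    maxW qs dp (qs.length - 1) = dp.getD (qs.length - 1) 0 + pvG qs (qs.length - 1) := by
  rw [maxW, dif_neg h]

-- one forward step preserves the potential
lemma stepB_inv (qs : List (List Int)) (dp : List Int) (best : Option Int) (i : Nat)
    (hi : i + 1 < qs.length) (hlen : dp.length = qs.length + 1) (hb : 0 ≤ pvB qs i) :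
    optMax (stepB qs qs.length (dp, best) i).2
        (maxW qs (stepB qs qs.length (dp, best) i).1 (i + 1))
      = optMax best (maxW qs dp i) := by
  set n := qs.length with hn_def
  have hq : PySem.List.pyGetD qs (i : Int) [] = qs.getD i [] := PySem.List.pyGetD_natCast qs i []
  have hbq : PySem.List.pyGetD (qs.getD i []) 1 0 = pvB qs i := PySem.List.pyGetD_ofNat' _ 1 0
  have hpq : PySem.List.pyGetD (qs.getD i []) 0 0 = pvP qs i := PySem.List.pyGetD_ofNat' _ 0 0
  -- the intermediate list after the skip-propagation
  set dp1 := if dp.getD (i + 1) 0 < dp.getD i 0 then dp.set (i + 1) (dp.getD i 0) else dp with hdp1_def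
  have hlen1 : dp1.length = n + 1 := by
    rw [hdp1_def]; split <;> simp [hlen]
  have hdp1_i1 : dp1.getD (i + 1) 0 = max (dp.getD (i + 1) 0) (dp.getD i 0) := by
    rw [hdp1_def]; split
    · rw [getD_set_self _ _ _ (by omega)]; omega
    · omega
  have hdp1_ne : ∀ j, j ≠ i + 1 → dp1.getD j 0 = dp.getD j 0 := by
    intro j hj
    rw [hdp1_def]; split
    · exact getD_set_ne _ _ _ _ (fun h => hj h.symm)
    · rfl
  have hdp1_i : dp1.getD i 0 = dp.getD i 0 := hdp1_ne i (by omega)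
  set v := dp1.getD i 0 + pvP qs i with hv_def
  have hscomm : (i : Int) + pvB qs i + 1 = pvB qs i + i + 1 := by ring
  -- common bounds
  have hge_i1 : dp.getD (i + 1) 0 + pvG qs (i + 1) ≤ maxW qs dp i :=
    maxW_ge qs dp i (i + 1) (by omega) (by omega)
  have hge_i : dp.getD i 0 + pvG qs i ≤ maxW qs dp i :=
    maxW_ge qs dp i i (le_refl _) (by omega)
  have hskip : dp.getD i 0 + pvG qs (i + 1) ≤ maxW qs dp i := by
    have h4 := pvG_mono_step qs i hi
    omega
  have hGrec := pvG_eq qs i hi hb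
  simp only [stepB]
  rw [hq, hbq, hpq, ← hdp1_def, hscomm, ← hv_def]
  split
  · -- the solve jumps past the end: it goes into the running best
    next hns =>
    have hsolve0 : pvP qs i ≤ pvG qs i := by
      rw [hGrec, if_pos hns]
      have := le_max_right (pvG qs (i + 1)) (pvP qs i + 0)
      omega
    have hvM : v ≤ maxW qs dp i := by
      rw [hv_def, hdp1_i]
      omega
    have hW1 : maxW qs dp1 (i + 1) ≤ maxW qs dp i := by
      refine maxW_le qs dp1 (i + 1) _ (by omega) ?_
      intro j h1 h2
      by_cases hj1 : j = i + 1
      · subst hj1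
        rw [hdp1_i1]
        rcases max_cases (dp.getD (i + 1) 0) (dp.getD i 0) with ⟨hm, _⟩ | ⟨hm, _⟩ <;> rw [hm]
        · exact hge_i1
        · exact hskip
      · rw [hdp1_ne j hj1]
        exact maxW_ge qs dp i j (by omega) h2
    have hMv : max v (maxW qs dp1 (i + 1)) = maxW qs dp i := by
      apply le_antisymm (max_le hvM hW1)
      refine maxW_le qs dp i _ (by omega) ?_
      intro j h1 h2
      rcases Nat.eq_or_lt_of_le h1 with hje | hjlt
      · -- j = i: the skip goes through dp1[i+1], the solve through v
        rw [← hje, hGrec, if_pos hns, add_zero]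
        rcases max_cases (pvG qs (i + 1)) (pvP qs i) with ⟨hm, _⟩ | ⟨hm, _⟩ <;> rw [hm]
        · have hcell : dp.getD i 0 ≤ dp1.getD (i + 1) 0 := by
            rw [hdp1_i1]; exact le_max_right _ _
          have h7 := maxW_ge qs dp1 (i + 1) (i + 1) (le_refl _) (by omega)
          have : dp.getD i 0 + pvG qs (i + 1) ≤ maxW qs dp1 (i + 1) := by omega
          exact le_trans this (le_max_right _ _)
        · have : dp.getD i 0 + pvP qs i = v := by rw [hv_def, hdp1_i]
          rw [this]
          exact le_max_left _ _
      · -- j ≥ i+1: dp1[j] ≥ dp[j]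
        have h10 := maxW_ge qs dp1 (i + 1) j hjlt h2
        have h11 : dp.getD j 0 ≤ dp1.getD j 0 := by
          by_cases hj1 : j = i + 1
          · subst hj1; rw [hdp1_i1]; exact le_max_left _ _
          · rw [hdp1_ne j hj1]
        have : dp.getD j 0 + pvG qs j ≤ maxW qs dp1 (i + 1) := by omega
        exact le_trans this (le_max_right _ _)
    cases best with
    | none =>
      show max v (maxW qs dp1 (i + 1)) = maxW qs dp i
      exact hMv
    | some b =>
      show optMax (if b < v then some v else some b) (maxW qs dp1 (i + 1))
          = max b (maxW qs dp i)
      have hb' : (if b < v then some v else some b) = some (max b v) := by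
        split
        · rw [max_eq_right (by omega)]
        · rw [max_eq_left (by omega)]
      rw [hb']
      show max (max b v) (maxW qs dp1 (i + 1)) = max b (maxW qs dp i)
      rw [max_assoc, hMv]
  · -- the solve is pushed to the in-range cell jN
    next hns =>
    have hspos : 0 < pvB qs i + (i : Int) + 1 := by omega
    set jN := (pvB qs i + i + 1).toNat with hjN_def
    have hjN_lb : i + 1 ≤ jN := by omega
    have hjN_ub : jN ≤ n - 1 := by omega
    have hcast : pvB qs i + (i : Int) + 1 = ((jN : Nat) : Int) := by omega
    rw [if_neg (by omega : ¬ pvB qs i + (i : Int) + 1 < 0)]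
    rw [hcast, PySem.List.pyGetD_natCast]
    have hGsolve : pvP qs i + pvG qs jN ≤ pvG qs i := by
      rw [hGrec, if_neg hns]
      exact le_max_right _ _
    have hsolve : v + pvG qs jN ≤ maxW qs dp i := by
      rw [hv_def, hdp1_i]
      omega
    set dp2 := if dp1.getD jN 0 < v then dp1.set jN v else dp1 with hdp2_def
    have hdp2_j : dp2.getD jN 0 = max (dp1.getD jN 0) v := by
      rw [hdp2_def]; split
      · rw [getD_set_self _ _ _ (by omega)]; omega
      · omega
    have hdp2_ne : ∀ j, j ≠ jN → dp2.getD j 0 = dp1.getD j 0 := by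
      intro j hj
      rw [hdp2_def]; split
      · exact getD_set_ne _ _ _ _ (fun h => hj h.symm)
      · rfl
    have hW : maxW qs dp2 (i + 1) = maxW qs dp i := by
      apply le_antisymm
      · refine maxW_le qs dp2 (i + 1) _ (by omega) ?_
        intro j h1 h2
        have hd1 : ∀ t, t ≤ n - 1 → i ≤ t → dp1.getD t 0 + pvG qs t ≤ maxW qs dp i := by
          intro t ht hit
          by_cases ht1 : t = i + 1
          · subst ht1
            rw [hdp1_i1]
            rcases max_cases (dp.getD (i + 1) 0) (dp.getD i 0) with ⟨hm, _⟩ | ⟨hm, _⟩ <;> rw [hm]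
            · exact hge_i1
            · exact hskip
          · rw [hdp1_ne t ht1]
            exact maxW_ge qs dp i t hit ht
        by_cases hjn : j = jN
        · subst hjn
          rw [hdp2_j]
          rcases max_cases (dp1.getD jN 0) v with ⟨hm, _⟩ | ⟨hm, _⟩ <;> rw [hm]
          · exact hd1 jN h2 (by omega)
          · exact hsolve
        · rw [hdp2_ne j hjn]
          exact hd1 j h2 (by omega)
      · refine maxW_le qs dp i _ (by omega) ?_
        intro j h1 h2
        have hdp2_ge_dp1 : ∀ t, dp1.getD t 0 ≤ dp2.getD t 0 := by
          intro t
          by_cases ht : t = jN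
          · subst ht; rw [hdp2_j]; exact le_max_left _ _
          · rw [hdp2_ne t ht]
        have hdp1_ge_dp : ∀ t, i + 1 ≤ t → dp.getD t 0 ≤ dp1.getD t 0 := by
          intro t _
          by_cases ht1 : t = i + 1
          · subst ht1; rw [hdp1_i1]; exact le_max_left _ _
          · rw [hdp1_ne t ht1]
        rcases Nat.eq_or_lt_of_le h1 with hje | hjlt
        · -- j = i
          rw [← hje, hGrec, if_neg hns]
          have c1 : dp.getD i 0 + pvG qs (i + 1) ≤ maxW qs dp2 (i + 1) := by
            have h6 : dp.getD i 0 ≤ dp1.getD (i + 1) 0 := by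
              rw [hdp1_i1]; exact le_max_right _ _
            have hcell : dp.getD i 0 ≤ dp2.getD (i + 1) 0 := le_trans h6 (hdp2_ge_dp1 (i + 1))
            have h7 := maxW_ge qs dp2 (i + 1) (i + 1) (le_refl _) (by omega)
            omega
          have c2 : dp.getD i 0 + (pvP qs i + pvG qs jN) ≤ maxW qs dp2 (i + 1) := by
            have hcell : dp.getD i 0 + pvP qs i ≤ dp2.getD jN 0 := by
              rw [hdp2_j]
              have h8 : dp.getD i 0 + pvP qs i = v := by rw [hv_def, hdp1_i]
              rw [h8]; exact le_max_right _ _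
            have h9 := maxW_ge qs dp2 (i + 1) jN hjN_lb hjN_ub
            omega
          rcases max_cases (pvG qs (i + 1)) (pvP qs i + pvG qs jN) with ⟨hm, _⟩ | ⟨hm, _⟩ <;> rw [hm]
          · exact c1
          · exact c2
        · -- j ≥ i+1
          have h10 := maxW_ge qs dp2 (i + 1) j hjlt h2
          have h11 := le_trans (hdp1_ge_dp j hjlt) (hdp2_ge_dp1 j)
          omega
    have hpair1 : (if dp1.getD jN 0 < v then (dp1.set jN v, best) else (dp1, best)).1 = dp2 := by
      rw [hdp2_def]; split <;> rfl
    have hpair2 : (if dp1.getD jN 0 < v then (dp1.set jN v, best) else (dp1, best)).2 = best := by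
      split <;> rfl
    rw [hpair1, hpair2, hW]

lemma stepB_fst_length (qs : List (List Int)) (n : Nat) (st : List Int × Option Int) (i : Nat) :
    (stepB qs n st i).1.length = st.1.length := by
  simp only [stepB]
  split
  · split <;> simp [List.length_set]
  · split
    · split <;> simp [List.length_set]
    · split <;> simp [List.length_set]

lemma loopB_correct (qs : List (List Int)) (hb : ∀ t, t < qs.length - 1 → 0 ≤ pvB qs t) :
    ∀ (fuel i : Nat) (st : List Int × Option Int), i + fuel = qs.length - 1 →
      st.1.length = qs.length + 1 →
      optMax (loopB qs qs.length fuel i st).2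
          (maxW qs (loopB qs qs.length fuel i st).1 (qs.length - 1))
        = optMax st.2 (maxW qs st.1 i) := by
  intro fuel
  induction fuel with
  | zero =>
    intro i st hcount _
    have : i = qs.length - 1 := by omega
    rw [this]
    rfl
  | succ fuel ih =>
    intro i st hcount hlen
    have hi : i + 1 < qs.length := by omega
    show optMax (loopB qs qs.length fuel (i + 1) (stepB qs qs.length st i)).2
        (maxW qs (loopB qs qs.length fuel (i + 1) (stepB qs qs.length st i)).1 (qs.length - 1))
      = optMax st.2 (maxW qs st.1 i)
    rw [ih (i + 1) (stepB qs qs.length st i) (by omega)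
        (by rw [stepB_fst_length]; exact hlen)]
    exact stepB_inv qs st.1 st.2 i hi hlen (hb i (by omega))

lemma maxW_replicate (qs : List (List Int)) :
    ∀ i, i ≤ qs.length - 1 → maxW qs (List.replicate (qs.length + 1) (0 : Int)) i = pvG qs i := by
  intro i
  induction hfuel : qs.length - 1 - i generalizing i with
  | zero =>
    intro hi
    have hie : i = qs.length - 1 := by omega
    subst hie
    rw [maxW, dif_neg (by omega), getD_replicate_zero, zero_add]
  | succ m ih =>
    intro hi
    have hlt : i + 1 < qs.length := by omega
    rw [maxW, dif_pos hlt, getD_replicate_zero, zero_add, ih (i + 1) (by omega) (by omega)]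
    have := pvG_mono_step qs i hlt
    omega

lemma mostPointsBest_alt_eq_pvG (qs : List (List Int)) (hne : qs ≠ [])
    (hb : ∀ t, t < qs.length - 1 → 0 ≤ pvB qs t) :
    mostPointsBest_alt qs = pvG qs 0 := by
  have hn : 1 ≤ qs.length := by
    cases qs with
    | nil => exact absurd rfl hne
    | cons a l => simp
  simp only [mostPointsBest_alt]
  set n := qs.length with hn_def
  set st := loopB qs n (n - 1) 0 (List.replicate (n + 1) (0 : Int), none) with hst_def
  have hplastv : PySem.List.pyGetD (PySem.List.pyGetD qs ((n : Int) - 1) []) 0 0 = pvP qs (n - 1) := by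
    have : (n : Int) - 1 = ((n - 1 : Nat) : Int) := by omega
    rw [this, PySem.List.pyGetD_natCast]
    exact PySem.List.pyGetD_ofNat' _ 0 0
  rw [hplastv]
  have hloop : optMax st.2 (maxW qs st.1 (n - 1)) = pvG qs 0 := by
    rw [hst_def, loopB_correct qs hb (n - 1) 0 _ (by omega) (by simp [hn_def])]
    show maxW qs (List.replicate (n + 1) (0 : Int)) 0 = pvG qs 0
    exact maxW_replicate qs 0 (by omega)
  rw [maxW_last qs st.1 (by omega)] at hloop
  rw [pvG_base qs (n - 1) (by omega)] at hloop
  rw [← hloop]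
  cases hb2 : st.2 with
  | none => rfl
  | some b => rfl

-- ===== VERDICT (by name: the statement is the Claim_ definition above) =====
theorem mostPointsBest_spec : Claim_equal_mostPointsBest := by
  intro qs _hdom hpre
  obtain ⟨hne, _hlast, hall⟩ := hpre
  have hlenpos : 0 < qs.length := by
    cases qs with
    | nil => exact absurd rfl hne
    | cons a l => simp
  have hb : ∀ t, t < qs.length - 1 → 0 ≤ pvB qs t := by
    intro t ht
    have htd : t < qs.dropLast.length := by simp [List.length_dropLast]; omega
    have hmem : qs.getD t [] ∈ qs.dropLast := by
      have hget : qs.dropLast[t] = qs[t]'(by omega) := List.getElem_dropLast htd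
      rw [List.getD_eq_getElem _ _ (by omega), ← hget]
      exact List.getElem_mem htd
    exact (hall _ hmem).2
  show mostPointsBest qs = mostPointsBest_alt qs
  rw [mostPointsBest_eq_pvG qs hne hb, mostPointsBest_alt_eq_pvG qs hne hb]
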